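-- pv_equiv track=rewrite | github.com/D1SCURSE/vtornik | вторник задание/2,9/задание 3.py | max_treasure_points
-- ===== SOURCE A (Python) =====
-- def max_treasure_points(points):
--     from collections import defaultdict
--
--     n = len(points)
--     graph = defaultdict(list)
--
--     last_digit_map = defaultdict(list)
--
--     for i in range(n):
--         x, y = points[i]
--         last_digit_map[(x % 10, y % 10)].append(i)
--
--     for (x_last, y_last), indices in last_digit_map.items():
--         for i in indices:
--             for j in indices:
--                 if i != j:
--                     graph[i].append(j)
--
--     def dfs(node, visited):
--         visited.add(node)
--         max_length = 1
--         for neighbor in graph[node]: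
--             if neighbor not in visited:
--                 max_length = max(max_length, 1 + dfs(neighbor, visited))
--         visited.remove(node)
--         return max_length
--
--     max_points = 1
--     for i in range(n):
--         max_points = max(max_points, dfs(i, set()))
--
--     return max_points
-- ===== SOURCE B (Python) =====
-- def max_treasure_points(points):
--     from collections import Counter
--     counts = Counter((x % 10, y % 10) for x, y in points)
--     return max(counts.values(), default=1)
-- ===== Notes on version B (the rewrite author's own statement) =====
-- stated objective: faster
-- what changed: A builds an equal-last-digits graph (a union of cliques) and runs an exponential DFS for the longest path from every node; B just counts points per last-digit bucket once and returns the largest bucket size (min 1), since the longest path in a clique visits all its nodes.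
import Mathlib
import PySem

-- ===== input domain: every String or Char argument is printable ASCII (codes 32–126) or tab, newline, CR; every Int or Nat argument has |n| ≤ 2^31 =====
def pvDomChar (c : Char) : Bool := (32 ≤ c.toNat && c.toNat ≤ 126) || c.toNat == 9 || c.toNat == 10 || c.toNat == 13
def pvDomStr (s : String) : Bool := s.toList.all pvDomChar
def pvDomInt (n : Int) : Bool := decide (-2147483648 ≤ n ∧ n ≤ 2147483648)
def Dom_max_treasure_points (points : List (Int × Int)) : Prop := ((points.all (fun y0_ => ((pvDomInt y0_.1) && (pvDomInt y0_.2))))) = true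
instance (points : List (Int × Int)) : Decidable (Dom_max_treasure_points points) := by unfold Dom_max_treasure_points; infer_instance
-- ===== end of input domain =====

-- B replaces A's exponential longest-path DFS over the equal-last-digits graph (a disjoint
-- union of cliques, whose longest path visits a whole clique) by a single counting pass:
-- the answer is the largest last-digit bucket size, at least 1.

-- ===== PORT A =====
-- A's inner `dfs(node, visited)`: Python adds `node` on entry and removes it on exit, so the
-- recursion is pure in `visited ∪ {node}`. Python's recursion terminates because `visited`
-- grows on every call; `fuel` (points.length + 1 at the top call) is only a termination
-- guard, proved never to run out in the lemmas below.
def mtpDfs (graph : PySem.Dict Int (List Int)) : Nat → Int → PySem.Set Int → Int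
  | 0, _, _ => 1
  | fuel+1, node, visited =>
    let visited' := PySem.Set.add visited node
    (graph.getD node []).foldl
      (fun m nb =>
        if PySem.Set.contains visited' nb then m
        else max m (1 + mtpDfs graph fuel nb visited')) 1

def max_treasure_points (points : List (Int × Int)) : Int :=
  let n : Int := PySem.List.len points
  let last_digit_map : PySem.Dict (Int × Int) (List Int) :=
    (PySem.List.pyRange 0 n).foldl
      (fun d i =>
        let p := PySem.List.pyGetD points i (0, 0)  -- i always in range here: exact
        d.modify (PySem.Int.mod p.1 10, PySem.Int.mod p.2 10) [] (· ++ [i]))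
      PySem.Dict.empty
  let graph : PySem.Dict Int (List Int) :=
    last_digit_map.items.foldl
      (fun g kv =>
        kv.2.foldl (fun g i =>
          kv.2.foldl (fun g j =>
            if i ≠ j then g.modify i [] (· ++ [j]) else g) g) g)
      PySem.Dict.empty
  (PySem.List.pyRange 0 n).foldl
    (fun acc i => max acc (mtpDfs graph (points.length + 1) i PySem.Set.empty)) 1

-- ===== PORT B =====
def max_treasure_points_alt (points : List (Int × Int)) : Int :=
  let counts := PySem.Dict.counter
    (points.map (fun p => (PySem.Int.mod p.1 10, PySem.Int.mod p.2 10)))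
  PySem.List.maxD counts.values (fun v => v) 1

-- ===== PRECONDITION & SPEC =====
def Spec_max_treasure_points (points : List (Int × Int)) (out : Int) : Prop := out = max_treasure_points_alt points
instance (points : List (Int × Int)) (out : Int) : Decidable (Spec_max_treasure_points points out) := by unfold Spec_max_treasure_points; infer_instance

-- ===== CLAIM (what is proved, stated in full; the proofs are below) =====
def Claim_equal_max_treasure_points : Prop := ∀ (points : List (Int × Int)), Dom_max_treasure_points points → Spec_max_treasure_points points (max_treasure_points points)

-- ===== LEMMAS AND PROOFS =====

-- names for the intermediate objects of A's port (proof-only)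
def mtpKey (p : Int × Int) : Int × Int := (PySem.Int.mod p.1 10, PySem.Int.mod p.2 10)
def mtpKeyAt (points : List (Int × Int)) (i : Int) : Int × Int :=
  mtpKey (PySem.List.pyGetD points i (0, 0))
def mtpIdxs (points : List (Int × Int)) : List Int :=
  PySem.List.pyRange 0 (PySem.List.len points)
def mtpBucket (points : List (Int × Int)) (k : Int × Int) : List Int :=
  (mtpIdxs points).filter (fun i => mtpKeyAt points i == k)
def mtpLdm (points : List (Int × Int)) : PySem.Dict (Int × Int) (List Int) :=
  (mtpIdxs points).foldl
    (fun d i => d.modify (mtpKeyAt points i) [] (· ++ [i])) PySem.Dict.empty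
def mtpGraph (points : List (Int × Int)) : PySem.Dict Int (List Int) :=
  (mtpLdm points).items.foldl
    (fun g kv =>
      kv.2.foldl (fun g i =>
        kv.2.foldl (fun g j =>
          if i ≠ j then g.modify i [] (· ++ [j]) else g) g) g)
    PySem.Dict.empty

lemma mtp_eq_named (points : List (Int × Int)) :
    max_treasure_points points =
      (mtpIdxs points).foldl
        (fun acc i => max acc (mtpDfs (mtpGraph points) (points.length + 1) i PySem.Set.empty)) 1 :=
  rfl

lemma ldm_getD (points : List (Int × Int)) (k : Int × Int) :
    (mtpLdm points).getD k [] = mtpBucket points k := by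
  have h : mtpLdm points
      = ((mtpIdxs points).map (fun i => (mtpKeyAt points i, i))).foldl
          (fun d p => d.modify p.1 [] (· ++ [p.2])) PySem.Dict.empty := by
    rw [List.foldl_map]; rfl
  rw [h, PySem.Dict.getD_foldl_modify_append]
  simp [mtpBucket, List.filter_map, List.map_map, Function.comp_def]

lemma ldm_keys (points : List (Int × Int)) :
    (mtpLdm points).keys = PySem.Set.ofList ((mtpIdxs points).map (mtpKeyAt points)) := by
  rw [mtpLdm, PySem.Dict.keys_foldl_modify_key]
  rfl

lemma ldm_keys_nodup (points : List (Int × Int)) : (mtpLdm points).keys.Nodup := by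
  rw [mtpLdm]
  exact PySem.Dict.nodup_keys_foldl_modify_key _ _ _ _ _
    (by simp [PySem.Dict.empty, PySem.Dict.keys])

lemma inner_getD (L : List Int) (i : Int) (g : PySem.Dict Int (List Int)) (m : Int) :
    (L.foldl (fun g j => if i ≠ j then g.modify i [] (· ++ [j]) else g) g).getD m []
      = if m = i then g.getD m [] ++ L.filter (fun j => j ≠ i) else g.getD m [] := by
  induction L generalizing g with
  | nil => simp
  | cons j t ih =>
    rw [List.foldl_cons, List.filter_cons]
    by_cases hij : i = j
    · have h1 : (if i ≠ j then g.modify i [] (· ++ [j]) else g) = g := by simp [hij]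
      have h2 : (decide (j ≠ i)) = false := by simp [hij]
      rw [h1, ih, h2]
      simp
    · have h1 : (if i ≠ j then g.modify i [] (· ++ [j]) else g) = g.modify i [] (· ++ [j]) := by
        simp [hij]
      have h2 : (decide (j ≠ i)) = true := by simp [Ne.symm hij]
      rw [h1, ih, h2]
      by_cases hmi : m = i
      · subst hmi
        simp [PySem.Dict.modify, PySem.Dict.getD_insert_self]
      · simp [hmi, PySem.Dict.modify, PySem.Dict.getD_insert_of_ne _ _ _ hmi]

lemma outer_getD (out : List Int) (L : List Int) (hnd : out.Nodup)
    (g : PySem.Dict Int (List Int)) (m : Int) :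
    (out.foldl (fun g i =>
        L.foldl (fun g j => if i ≠ j then g.modify i [] (· ++ [j]) else g) g) g).getD m []
      = if m ∈ out then g.getD m [] ++ L.filter (fun j => j ≠ m) else g.getD m [] := by
  induction out generalizing g with
  | nil => simp
  | cons i t ih =>
    rw [List.foldl_cons, ih (List.Nodup.of_cons hnd)]
    by_cases hmt : m ∈ t
    · have hmi : m ≠ i := by
        rintro rfl; exact (List.nodup_cons.mp hnd).1 hmt
      rw [inner_getD, if_neg hmi]
      simp [hmt]
    · rw [inner_getD]
      by_cases hmi : m = i
      · subst hmi; simp [hmt]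
      · simp [hmt, hmi]

lemma mem_bucket (points : List (Int × Int)) (k : Int × Int) (m : Int) :
    m ∈ mtpBucket points k ↔ m ∈ mtpIdxs points ∧ mtpKeyAt points m = k := by
  simp [mtpBucket, List.mem_filter]

lemma bucket_nodup (points : List (Int × Int)) (k : Int × Int) :
    (mtpBucket points k).Nodup :=
  (PySem.List.nodup_pyRange_one 0 (PySem.List.len points)).filter _

lemma keys_fold_getD (points : List (Int × Int)) (ks : List (Int × Int)) (hnd : ks.Nodup)
    (g : PySem.Dict Int (List Int)) (m : Int) :
    (ks.foldl (fun g k =>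
        (mtpBucket points k).foldl (fun g i =>
          (mtpBucket points k).foldl (fun g j =>
            if i ≠ j then g.modify i [] (· ++ [j]) else g) g) g) g).getD m []
      = if mtpKeyAt points m ∈ ks ∧ m ∈ mtpIdxs points
        then g.getD m [] ++ (mtpBucket points (mtpKeyAt points m)).filter (fun j => j ≠ m)
        else g.getD m [] := by
  induction ks generalizing g with
  | nil => simp
  | cons k t ih =>
    rw [List.foldl_cons, ih (List.Nodup.of_cons hnd)]
    by_cases hkt : mtpKeyAt points m ∈ t
    · have hkm : mtpKeyAt points m ≠ k := by
        rintro rfl; exact (List.nodup_cons.mp hnd).1 hkt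
      have hmb : m ∉ mtpBucket points k := by
        rw [mem_bucket]; rintro ⟨_, h⟩; exact hkm h
      rw [outer_getD _ _ (bucket_nodup points k), if_neg hmb]
      by_cases hmi : m ∈ mtpIdxs points
      · simp [hkt, hmi]
      · simp [hkt, hmi]
    · rw [outer_getD _ _ (bucket_nodup points k)]
      by_cases hc : mtpKeyAt points m = k ∧ m ∈ mtpIdxs points
      · obtain ⟨hk, hmi⟩ := hc
        have hmb : m ∈ mtpBucket points k := (mem_bucket _ _ _).mpr ⟨hmi, hk⟩
        rw [if_pos hmb]
        have hknt : k ∉ t := hk ▸ hkt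
        simp [hk, hmi, hknt]
      · have hmb : m ∉ mtpBucket points k := by
          rw [mem_bucket]; rintro ⟨hmi, hk⟩; exact hc ⟨hk, hmi⟩
        rw [if_neg hmb]
        have hns : ¬(mtpKeyAt points m ∈ k :: t ∧ m ∈ mtpIdxs points) := by
          rintro ⟨hmem, hmi⟩
          rcases List.mem_cons.mp hmem with h | h
          · exact hc ⟨h, hmi⟩
          · exact hkt h
        simp only [hns, if_false]
        simp [hkt]

lemma graph_getD (points : List (Int × Int)) (m : Int) :
    (mtpGraph points).getD m [] =
      if m ∈ mtpIdxs points
      then (mtpBucket points (mtpKeyAt points m)).filter (fun j => j ≠ m)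
      else [] := by
  have hitems : (mtpLdm points).items
      = (mtpLdm points).keys.map (fun k => (k, mtpBucket points k)) := by
    rw [PySem.Dict.items_eq_map_keys _ (ldm_keys_nodup points) []]
    exact List.map_congr_left (fun k _ => by rw [ldm_getD])
  have h : mtpGraph points
      = (mtpLdm points).keys.foldl (fun g k =>
          (mtpBucket points k).foldl (fun g i =>
            (mtpBucket points k).foldl (fun g j =>
              if i ≠ j then g.modify i [] (· ++ [j]) else g) g) g) PySem.Dict.empty := by
    rw [mtpGraph, hitems, List.foldl_map]
  rw [h, keys_fold_getD points _ (ldm_keys_nodup points)]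
  by_cases hmi : m ∈ mtpIdxs points
  · have hk : mtpKeyAt points m ∈ (mtpLdm points).keys := by
      rw [ldm_keys, PySem.Set.mem_ofList]
      exact List.mem_map_of_mem hmi
    simp [hmi, hk, PySem.Dict.getD, PySem.Dict.empty, PySem.Dict.get?]
  · simp [hmi, PySem.Dict.getD, PySem.Dict.empty, PySem.Dict.get?]

lemma fold_max_skip (ns : List Int) (q : Int → Bool) (c : Int) (acc : Int) :
    (ns.foldl (fun a nb => if q nb then a else max a c) acc)
      = if ns.any (fun nb => !q nb) then max acc c else acc := by
  induction ns generalizing acc with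
  | nil => simp
  | cons nb t ih =>
    simp only [List.foldl_cons, List.any_cons]
    by_cases h : q nb
    · simp [h, ih]
    · simp [h, ih]

lemma countP_split (l : List Int) (p q : Int → Bool) :
    l.countP p = l.countP (fun x => p x && q x) + l.countP (fun x => p x && !q x) := by
  induction l with
  | nil => simp
  | cons x t ih => by_cases h : p x <;> by_cases h2 : q x <;> simp [h, h2, ih] <;> omega

lemma dfs_eq (graph : PySem.Dict Int (List Int)) (B0 : List Int) (hnd : B0.Nodup)
    (hgr : ∀ x ∈ B0, graph.getD x [] = B0.filter (fun j => j ≠ x)) :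
    ∀ (fuel : Nat) (node : Int) (visited : PySem.Set Int),
      node ∈ B0 → node ∉ visited →
      B0.countP (fun x => !PySem.Set.contains visited x) ≤ fuel →
      mtpDfs graph fuel node visited
        = (B0.countP (fun x => !PySem.Set.contains visited x) : Int) := by
  intro fuel
  induction fuel with
  | zero =>
    intro node visited hmem hvis hle
    exfalso
    have : 0 < B0.countP (fun x => !PySem.Set.contains visited x) :=
      List.countP_pos_iff.mpr ⟨node, hmem,
        by simp [PySem.Set.contains, List.contains_eq_mem, hvis]⟩
    omega
  | succ fuel ih =>
    intro node visited hmem hvis hle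
    have hcv : PySem.Set.contains visited node = false := by
      simpa [PySem.Set.contains, List.contains_eq_mem] using hvis
    have hadd : PySem.Set.add visited node = visited ++ [node] := by
      simp [PySem.Set.add, hvis]
    have hpt : ∀ x, (!PySem.Set.contains (PySem.Set.add visited node) x)
        = ((!PySem.Set.contains visited x) && !(x == node)) := by
      intro x
      simp only [hadd, PySem.Set.contains, List.contains_eq_mem, List.mem_append,
        List.mem_singleton]
      by_cases h1 : x ∈ visited <;> by_cases h2 : x = node <;> simp [h1, h2]
    set p : Int → Bool := fun x => !PySem.Set.contains visited x with hp
    set m' : Nat := B0.countP (fun x => !PySem.Set.contains (PySem.Set.add visited node) x) with hm'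
    have hone : B0.countP (fun x => p x && (x == node)) = 1 := by
      have he : ∀ x, (p x && (x == node)) = (x == node) := by
        intro x
        by_cases h : x = node
        · subst h; simp [hp, hvis]
        · simp [h]
      have h1 : B0.countP (fun x => p x && (x == node)) = B0.countP (fun x => x == node) :=
        List.countP_congr (fun x _ => by rw [he x])
      rw [h1, ← List.count_eq_countP]
      exact List.count_eq_one_of_mem hnd hmem
    have hsplit : B0.countP p = m' + 1 := by
      have := countP_split B0 p (fun x => !(x == node))
      have h2 : m' = B0.countP (fun x => p x && !(x == node)) := by
        rw [hm']
        exact List.countP_congr (fun x _ => by rw [hpt x])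
      have h3 : B0.countP (fun x => p x && !(!(x == node))) = 1 := by
        rw [← hone]
        exact List.countP_congr (fun x _ => by simp only [Bool.not_not])
      omega
    rw [show mtpDfs graph (fuel+1) node visited
        = (graph.getD node []).foldl
            (fun m nb =>
              if PySem.Set.contains (PySem.Set.add visited node) nb then m
              else max m (1 + mtpDfs graph fuel nb (PySem.Set.add visited node))) 1 from rfl]
    rw [hgr node hmem]
    have hcong := PySem.List.foldl_congr_mem (B0.filter (fun j => j ≠ node))
      (fun acc nb => if PySem.Set.contains (PySem.Set.add visited node) nb then acc
        else max acc (1 + mtpDfs graph fuel nb (PySem.Set.add visited node)))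
      (fun acc nb => if PySem.Set.contains (PySem.Set.add visited node) nb then acc
        else max acc (1 + (m' : Int))) 1
      (by
        intro acc nb hnb
        dsimp only
        by_cases hc : PySem.Set.contains (PySem.Set.add visited node) nb = true
        · rw [if_pos hc, if_pos hc]
        · have hnbB : nb ∈ B0 := (List.mem_filter.mp hnb).1
          have hnv : nb ∉ PySem.Set.add visited node := by
            simpa [PySem.Set.contains, List.contains_eq_mem] using hc
          have hle' : B0.countP (fun x => !PySem.Set.contains (PySem.Set.add visited node) x) ≤ fuel := by
            omega
          rw [if_neg hc, if_neg hc, ih nb (PySem.Set.add visited node) hnbB hnv hle'])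
    rw [hcong, fold_max_skip]
    rw [hsplit]
    by_cases hz : m' = 0
    · have hany : (B0.filter (fun j => j ≠ node)).any
          (fun nb => !PySem.Set.contains (PySem.Set.add visited node) nb) = false := by
        by_contra h
        rw [Bool.not_eq_false, List.any_eq_true] at h
        obtain ⟨nb, hnb, hq⟩ := h
        have : 0 < m' := by
          rw [hm']
          exact List.countP_pos_iff.mpr ⟨nb, (List.mem_filter.mp hnb).1, hq⟩
        omega
      rw [hany]
      simp [hz]
    · have h0 : 0 < m' := Nat.pos_of_ne_zero hz
      obtain ⟨x, hxB, hxq⟩ := List.countP_pos_iff.mp (hm' ▸ h0)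
      have hxnode : x ≠ node := by
        intro h
        subst h
        rw [hpt] at hxq
        simp at hxq
      have hxf : x ∈ B0.filter (fun j => j ≠ node) :=
        List.mem_filter.mpr ⟨hxB, by simp [hxnode]⟩
      have hany : (B0.filter (fun j => j ≠ node)).any
          (fun nb => !PySem.Set.contains (PySem.Set.add visited node) nb) = true :=
        List.any_eq_true.mpr ⟨x, hxf, hxq⟩
      rw [hany]
      push_cast
      simp only [if_true]
      omega

lemma dfs_top (points : List (Int × Int)) (i : Int) (hi : i ∈ mtpIdxs points) :
    mtpDfs (mtpGraph points) (points.length + 1) i PySem.Set.empty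
      = ((mtpBucket points (mtpKeyAt points i)).length : Int) := by
  have hgr : ∀ x ∈ mtpBucket points (mtpKeyAt points i),
      (mtpGraph points).getD x [] = (mtpBucket points (mtpKeyAt points i)).filter (fun j => j ≠ x) := by
    intro x hx
    obtain ⟨hxi, hkx⟩ := (mem_bucket _ _ _).mp hx
    rw [graph_getD, if_pos hxi, hkx]
  have hcnt : (mtpBucket points (mtpKeyAt points i)).countP
      (fun x => !PySem.Set.contains PySem.Set.empty x) = (mtpBucket points (mtpKeyAt points i)).length := by
    rw [List.countP_eq_length]
    intro x _
    rfl
  have hlen : (mtpBucket points (mtpKeyAt points i)).length ≤ points.length + 1 := by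
    have h1 : (mtpBucket points (mtpKeyAt points i)).length ≤ (mtpIdxs points).length :=
      List.length_filter_le _ _
    have h2 : (mtpIdxs points).length = points.length := by
      rw [mtpIdxs, PySem.List.length_pyRange_one]
      simp [PySem.List.len]
    omega
  rw [dfs_eq (mtpGraph points) (mtpBucket points (mtpKeyAt points i))
      (bucket_nodup points (mtpKeyAt points i)) hgr (points.length + 1) i PySem.Set.empty
      ((mem_bucket _ _ _).mpr ⟨hi, rfl⟩) (by simp [PySem.Set.empty]) (by omega), hcnt]

lemma idxs_map_key (points : List (Int × Int)) :
    (mtpIdxs points).map (mtpKeyAt points) = points.map mtpKey := by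
  have h : (mtpIdxs points).map (mtpKeyAt points)
      = ((mtpIdxs points).map (fun j => PySem.List.pyGetD points j (0, 0))).map mtpKey := by
    rw [List.map_map]; rfl
  rw [h, mtpIdxs, PySem.List.map_pyGetD_pyRange_zero]

lemma bucket_length_eq_count (points : List (Int × Int)) (k : Int × Int) :
    (mtpBucket points k).length = (points.map mtpKey).count k := by
  rw [mtpBucket, ← List.countP_eq_length_filter, ← idxs_map_key, List.count_eq_countP,
    List.countP_map]
  rfl

lemma A_eq_fold (points : List (Int × Int)) :
    max_treasure_points points =
      (points.map mtpKey).foldl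
        (fun acc k => max acc (((points.map mtpKey).count k : Nat) : Int)) 1 := by
  rw [mtp_eq_named]
  have h1 : (mtpIdxs points).foldl
      (fun acc i => max acc (mtpDfs (mtpGraph points) (points.length + 1) i PySem.Set.empty)) 1
      = (mtpIdxs points).foldl
        (fun acc i => max acc (((points.map mtpKey).count (mtpKeyAt points i) : Nat) : Int)) 1 := by
    apply PySem.List.foldl_congr_mem
    intro acc i hi
    dsimp only
    rw [dfs_top points i hi, bucket_length_eq_count]
  rw [h1, ← idxs_map_key, List.foldl_map]

lemma foldl_max_count_eq_maxD (ks : List (Int × Int)) :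
    ks.foldl (fun acc k => max acc ((ks.count k : Nat) : Int)) 1
      = PySem.List.maxD ((PySem.Set.ofList ks).map (fun k => ((ks.count k : Nat) : Int)))
          (fun v => v) 1 := by
  rcases hks : ks with _ | ⟨k0, t⟩
  · rfl
  · rw [← hks]
    set f : (Int × Int) → Int := fun k => ((ks.count k : Nat) : Int) with hf
    set a : Int := ks.foldl (fun acc k => max acc (f k)) 1 with ha
    set vs : List Int := (PySem.Set.ofList ks).map f with hvs
    have hvsne : vs ≠ [] := by
      rw [hvs]
      have hk0 : k0 ∈ PySem.Set.ofList ks := (PySem.Set.mem_ofList ks k0).mpr (by rw [hks]; simp)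
      intro h
      rw [List.map_eq_nil_iff] at h
      rw [h] at hk0
      simp at hk0
    rcases hv : vs with _ | ⟨v, vt⟩
    · exact absurd hv hvsne
    have hrhs : PySem.List.maxD (v :: vt) (fun y => y) 1 = vt.foldl max v := by
      rw [PySem.List.maxD, PySem.List.max?_id_cons]
      rfl
    set b : Int := vt.foldl max v with hb
    have hbvs : b ∈ vs := by
      rw [hv]
      rcases PySem.List.foldl_max_mem vt v with h | h
      · rw [hb, h]; simp
      · rw [hb]; exact List.mem_cons_of_mem _ h
    have hvsle : ∀ y ∈ vs, y ≤ b := by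
      intro y hy
      rw [hv] at hy
      rcases List.mem_cons.mp hy with h | h
      · rw [h, hb]; exact (PySem.List.le_foldl_max vt v).1
      · exact (PySem.List.le_foldl_max vt v).2 y h
    have hmemf : ∀ k ∈ ks, f k ∈ vs := by
      intro k hk
      rw [hvs]
      exact List.mem_map_of_mem ((PySem.Set.mem_ofList ks k).mpr hk)
    have ha1 : 1 ≤ a ∧ ∀ k ∈ ks, f k ≤ a := PySem.List.le_foldl_max_int ks f 1
    have hb1 : 1 ≤ b := by
      rw [hvs] at hbvs
      obtain ⟨k, hk, hfk⟩ := List.mem_map.mp hbvs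
      rw [← hfk]
      show (1 : Int) ≤ ((ks.count k : Nat) : Int)
      have : 0 < ks.count k := List.count_pos_iff.mpr ((PySem.Set.mem_ofList ks k).mp hk)
      omega
    have hab : a ≤ b := by
      have hmem : a = 1 ∨ a ∈ ks.map f := by
        have heq : a = (ks.map f).foldl max 1 := by rw [ha, List.foldl_map]
        rw [heq]
        exact PySem.List.foldl_max_mem (ks.map f) 1
      rcases hmem with h | h
      · rw [h]; exact hb1
      · obtain ⟨k, hk, hfk⟩ := List.mem_map.mp h
        rw [← hfk]
        exact hvsle _ (hmemf k hk)
    have hba : b ≤ a := by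
      rw [hvs] at hbvs
      obtain ⟨k, hk, hfk⟩ := List.mem_map.mp hbvs
      rw [← hfk]
      exact ha1.2 k ((PySem.Set.mem_ofList ks k).mp hk)
    rw [hrhs]
    exact le_antisymm hab hba

lemma B_eq (points : List (Int × Int)) :
    max_treasure_points_alt points
      = PySem.List.maxD ((PySem.Set.ofList (points.map mtpKey)).map
          (fun k => (((points.map mtpKey).count k : Nat) : Int))) (fun v => v) 1 := by
  rw [show max_treasure_points_alt points
      = PySem.List.maxD (PySem.Dict.counter (points.map mtpKey)).values (fun v => v) 1 from rfl]
  rw [PySem.Dict.values, PySem.Dict.items_counter, List.map_map]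
  rfl

-- ===== VERDICT (by name: the statement is the Claim_ definition above) =====
theorem max_treasure_points_spec : Claim_equal_max_treasure_points := by
  intro points _
  show max_treasure_points points = max_treasure_points_alt points
  rw [A_eq_fold, B_eq, foldl_max_count_eq_maxD]
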